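-- pv_equiv track=rewrite | github.com/AnnavarapuJashwanth/ai-career | backend/services/role_discovery_service.py | _match_role_name
-- ===== SOURCE A (Python) =====
-- from typing import Dict, List, Any
--
-- def _match_role_name(candidate: str, available_roles: List[str]) -> str | None:
--     """Return the closest role name from available roles."""
--     if not candidate:
--         return None
--
--     candidate_lower = candidate.lower()
--
--     # Exact match ignoring case
--     for role in available_roles:
--         if candidate_lower == role.lower():
--             return role
--
--     # Partial match (substring)
--     for role in available_roles:
--         role_lower = role.lower()
--         if candidate_lower in role_lower or role_lower in candidate_lower:
--             return role
--
--     return None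
-- ===== SOURCE B (Python) =====
-- def _match_role_name(candidate, available_roles):
--     """Single pass: return first exact match immediately; remember first substring match."""
--     if not candidate:
--         return None
--     candidate_lower = candidate.lower()
--     first_substring = None
--     for role in available_roles:
--         role_lower = role.lower()
--         if candidate_lower == role_lower:
--             return role
--         if first_substring is None and (candidate_lower in role_lower or role_lower in candidate_lower):
--             first_substring = role
--     return first_substring
-- ===== Notes on version B (the rewrite author's own statement) =====
-- stated objective: alternative
-- what changed: Replaces A's two sequential scans (exact pass, then substring pass) with a single scan that returns on the first exact match and keeps the first substring match in an accumulator, lowering each role once instead of twice.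
import Mathlib
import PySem

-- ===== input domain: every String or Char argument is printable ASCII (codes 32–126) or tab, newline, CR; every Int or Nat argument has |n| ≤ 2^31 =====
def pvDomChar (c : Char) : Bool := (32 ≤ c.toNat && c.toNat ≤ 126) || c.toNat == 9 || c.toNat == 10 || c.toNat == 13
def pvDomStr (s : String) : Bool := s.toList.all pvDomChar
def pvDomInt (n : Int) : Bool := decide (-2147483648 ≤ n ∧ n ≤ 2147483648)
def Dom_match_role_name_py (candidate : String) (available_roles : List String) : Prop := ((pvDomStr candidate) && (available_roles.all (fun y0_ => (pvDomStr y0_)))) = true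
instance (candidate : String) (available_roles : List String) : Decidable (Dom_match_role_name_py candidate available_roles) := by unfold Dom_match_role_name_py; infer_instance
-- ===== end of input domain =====

-- B replaces A's two sequential scans with one scan keeping the first substring match
-- in an accumulator and returning immediately on an exact match (each role lowered once).


-- ===== PORT A =====
-- first loop of A: exact match ignoring case
def pvFindExact (cl : String) : List String → Option String
  | [] => none
  | r :: rs => if cl == PySem.Str.lower r then some r else pvFindExact cl rs

-- second loop of A: first substring match
def pvFindSub (cl : String) : List String → Option String
  | [] => none
  | r :: rs =>
    let rl := PySem.Str.lower r
    if PySem.Str.isIn cl rl || PySem.Str.isIn rl cl then some r else pvFindSub cl rs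

def match_role_name_py (candidate : String) (available_roles : List String) : Option String :=
  if candidate == "" then none
  else
    let cl := PySem.Str.lower candidate
    match pvFindExact cl available_roles with
    | some r => some r
    | none => pvFindSub cl available_roles

-- ===== PORT B =====
-- single scan with a `first_substring` accumulator
def pvScan (cl : String) (acc : Option String) : List String → Option String
  | [] => acc
  | r :: rs =>
    let rl := PySem.Str.lower r
    if cl == rl then some r
    else
      pvScan cl
        (if acc.isNone && (PySem.Str.isIn cl rl || PySem.Str.isIn rl cl) then some r else acc)
        rs

def match_role_name_py_alt (candidate : String) (available_roles : List String) : Option String :=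
  if candidate == "" then none
  else pvScan (PySem.Str.lower candidate) none available_roles

-- ===== PRECONDITION & SPEC =====
def Spec_match_role_name_py (candidate : String) (available_roles : List String) (out : Option String) : Prop := out = match_role_name_py_alt candidate available_roles
instance (candidate : String) (available_roles : List String) (out : Option String) : Decidable (Spec_match_role_name_py candidate available_roles out) := by unfold Spec_match_role_name_py; infer_instance

-- ===== CLAIM (what is proved, stated in full; the proofs are below) =====
def Claim_equal_match_role_name_py : Prop := ∀ (candidate : String) (available_roles : List String), Dom_match_role_name_py candidate available_roles → Spec_match_role_name_py candidate available_roles (match_role_name_py candidate available_roles)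

-- ===== LEMMAS AND PROOFS =====
theorem pvScan_eq (cl : String) (roles : List String) :
    ∀ acc : Option String,
      pvScan cl acc roles =
        match pvFindExact cl roles with
        | some r => some r
        | none => match acc with
                  | some a => some a
                  | none => pvFindSub cl roles := by
  induction roles with
  | nil => intro acc; cases acc <;> simp [pvScan, pvFindExact, pvFindSub]
  | cons r rs ih =>
    intro acc
    simp only [pvScan, pvFindExact, pvFindSub]
    by_cases hx : (cl == PySem.Str.lower r) = true
    · simp [hx]
    · simp only [hx, if_false, Bool.false_eq_true]
      rw [ih]
      cases acc with
      | some a => simp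
      | none =>
        cases hE : pvFindExact cl rs <;> split_ifs <;> simp_all

-- ===== VERDICT (by name: the statement is the Claim_ definition above) =====
theorem match_role_name_py_spec : Claim_equal_match_role_name_py := by
  intro candidate available_roles _
  unfold Spec_match_role_name_py match_role_name_py match_role_name_py_alt
  by_cases h : (candidate == "") = true
  · simp [h]
  · simp only [h, Bool.false_eq_true, if_false]
    rw [pvScan_eq]
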